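-- pv_equiv track=rewrite | github.com/jbpayton/promethia | ActionLoader.py | generate_token_signature_tuples
-- ===== SOURCE A (Python) =====
-- from itertools import product
--
-- def generate_token_signature_tuples(tokens, optional_map):
--     # Ensure the input lists are of the same length
--     assert len(tokens) == len(optional_map), "Tokens and optional_map must be of the same length."
--
--     # Filter out the optional elements and their indices
--     optional_elements = [(i, t) for i, (t, is_optional) in enumerate(zip(tokens, optional_map)) if is_optional]
--
--     # Generate all combinations of optional elements being included or excluded
--     combinations = list(product([True, False], repeat=len(optional_elements)))
--
--     # Generate the signatures using tokens, but return as tuples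
--     token_signature_tuples = []
--     for combination in combinations:
--         current_signature = tokens[:]  # Start with a copy of the original list of tokens
--         for include, (index, _) in zip(combination, optional_elements):
--             if not include:
--                 current_signature[index] = None  # Exclude the optional element by marking it as None
--         # Filter out None values (excluded tokens) and convert to tuple
--         token_signature_tuples.append(tuple(filter(None, current_signature)))
--
--     return token_signature_tuples
-- ===== SOURCE B (Python) =====
-- def generate_token_signature_tuples(tokens, optional_map):
--     # Ensure the input lists are of the same length
--     assert len(tokens) == len(optional_map), "Tokens and optional_map must be of the same length."
--
--     # Recursive walk: at each index build the signatures of the suffix, include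
--     # branch before exclude branch (matching product's True-first, leftmost-slowest order);
--     # falsy tokens are dropped exactly as filter(None) drops them.
--     def rec(i):
--         if i == len(tokens):
--             return [()]
--         rest = rec(i + 1)
--         t = tokens[i]
--         with_t = [(t,) + r for r in rest] if t else rest
--         return with_t + rest if optional_map[i] else with_t
--
--     return rec(0)
-- ===== Notes on version B (the rewrite author's own statement) =====
-- stated objective: simpler
-- what changed: Replaces itertools.product over the optional indices plus per-combination list copy, mark-None and filter passes with a single recursive walk over the tokens that builds each signature directly, emitting include-before-exclude to reproduce product's order.
import Mathlib
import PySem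

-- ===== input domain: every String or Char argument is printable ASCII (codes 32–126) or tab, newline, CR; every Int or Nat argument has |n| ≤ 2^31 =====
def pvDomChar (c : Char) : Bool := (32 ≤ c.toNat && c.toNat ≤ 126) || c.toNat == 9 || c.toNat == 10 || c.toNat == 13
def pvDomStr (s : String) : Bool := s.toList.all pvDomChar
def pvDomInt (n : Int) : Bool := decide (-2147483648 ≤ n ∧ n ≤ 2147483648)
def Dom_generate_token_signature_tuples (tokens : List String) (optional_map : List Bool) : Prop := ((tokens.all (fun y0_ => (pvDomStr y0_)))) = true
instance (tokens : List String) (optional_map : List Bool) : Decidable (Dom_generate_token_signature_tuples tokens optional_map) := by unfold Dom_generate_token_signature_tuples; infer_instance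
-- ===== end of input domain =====

-- B replaces product+copy/mark-None/filter with one recursive walk building each signature directly (simpler decomposition, same output order).


-- ===== PORT A =====
-- itertools.product([True, False], repeat=n), in product's order (leftmost slowest, True first)
def pvProductTF : Nat → List (List Bool)
  | 0 => [[]]
  | n + 1 => (pvProductTF n).map (true :: ·) ++ (pvProductTF n).map (false :: ·)

-- loop body of 'for include, (index, _) in zip(combination, optional_elements): if not include: current_signature[index] = None'
def pvMarkStep (cur : List (Option String)) (p : Bool × (Int × String)) : List (Option String) :=
  if !p.1 then PySem.List.pySetD cur p.2.1 none else cur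

-- filter(None, current_signature): keep exactly the truthy entries
def pvKeep (o : Option String) : Option String :=
  match o with
  | some s => if s = "" then none else some s
  | none => none

def generate_token_signature_tuples (tokens : List String) (optional_map : List Bool) : List (List String) :=
  let optional_elements :=
    ((PySem.List.enumerate (tokens.zip optional_map)).filter (fun p => p.2.2)).map
      (fun p => (p.1, p.2.1))
  let combinations := pvProductTF optional_elements.length
  combinations.map (fun combination =>
    let current_signature :=
      (combination.zip optional_elements).foldl pvMarkStep (tokens.map some)
    current_signature.filterMap pvKeep)

-- ===== PORT B =====
-- rec(i) of Source B, as structural recursion on the two lists (rec reads tokens[i], optional_map[i])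
def pvAltRec : List String → List Bool → List (List String)
  | [], _ => [[]]
  | _ :: _, [] => [[]]
  | t :: ts, o :: os =>
    let rest := pvAltRec ts os
    let with_t := if t ≠ "" then rest.map (t :: ·) else rest
    if o then with_t ++ rest else with_t

def generate_token_signature_tuples_alt (tokens : List String) (optional_map : List Bool) : List (List String) :=
  pvAltRec tokens optional_map

-- ===== PRECONDITION & SPEC =====
-- A (and B) assert len(tokens) == len(optional_map); unequal lengths raise AssertionError.
def Pre_generate_token_signature_tuples (tokens : List String) (optional_map : List Bool) : Prop :=
  tokens.length = optional_map.length
instance (tokens : List String) (optional_map : List Bool) : Decidable (Pre_generate_token_signature_tuples tokens optional_map) := by unfold Pre_generate_token_signature_tuples; infer_instance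
def pvWitness_generate_token_signature_tuples : List String × List Bool := (["go", "", "north"], [false, true, true])
def Spec_generate_token_signature_tuples (tokens : List String) (optional_map : List Bool) (out : List (List String)) : Prop := out = generate_token_signature_tuples_alt tokens optional_map
instance (tokens : List String) (optional_map : List Bool) (out : List (List String)) : Decidable (Spec_generate_token_signature_tuples tokens optional_map out) := by unfold Spec_generate_token_signature_tuples; infer_instance

-- ===== CLAIM (what is proved, stated in full; the proofs are below) =====
def Claim_equal_generate_token_signature_tuples : Prop := ∀ (tokens : List String) (optional_map : List Bool), Dom_generate_token_signature_tuples tokens optional_map → Pre_generate_token_signature_tuples tokens optional_map → Spec_generate_token_signature_tuples tokens optional_map (generate_token_signature_tuples tokens optional_map)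

-- ===== LEMMAS AND PROOFS =====

-- the 'optional_elements' expression of port A, with the enumerate start as a parameter
def pvOptElems (zs : List (String × Bool)) (s : Int) : List (Int × String) :=
  ((PySem.List.enumerate zs s).filter (fun p => p.2.2)).map (fun p => (p.1, p.2.1))

lemma A_unfold (tokens : List String) (om : List Bool) :
    generate_token_signature_tuples tokens om
      = (pvProductTF (pvOptElems (tokens.zip om) 0).length).map (fun c =>
          ((c.zip (pvOptElems (tokens.zip om) 0)).foldl pvMarkStep (tokens.map some)).filterMap pvKeep) := rfl

lemma optElems_cons (t : String) (o : Bool) (zs : List (String × Bool)) (s : Int) :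
    pvOptElems ((t, o) :: zs) s
      = (if o then [(s, t)] else []) ++ pvOptElems zs (s + 1) := by
  simp [pvOptElems, PySem.List.enumerate_cons, List.filter_cons]
  by_cases h : o <;> simp [h]

lemma optElems_shift (zs : List (String × Bool)) (s : Int) :
    (pvOptElems zs (s + 1)).map (fun p => (p.1 - 1, p.2)) = pvOptElems zs s := by
  induction zs generalizing s with
  | nil => simp [pvOptElems, PySem.List.enumerate_nil]
  | cons z zs ih =>
    cases z with
    | mk t o =>
      rw [optElems_cons, optElems_cons]
      by_cases h : o <;> simp [h, ih (s + 1)]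

lemma optElems_indices_ge (zs : List (String × Bool)) (s : Int) :
    ∀ p ∈ pvOptElems zs s, s ≤ p.1 := by
  intro p hp
  rcases List.mem_map.1 hp with ⟨q, hq, rfl⟩
  have hq' := (List.mem_filter.1 hq).1
  rcases (PySem.List.mem_enumerate_iff _ _ _).1 hq' with ⟨k, hk, rfl⟩
  simp

-- the marking fold over indices ≥ 1 never touches the head
lemma foldl_markStep_cons (c : List Bool) (oe : List (Int × String))
    (hoe : ∀ p ∈ oe, (1 : Int) ≤ p.1) (h : Option String) (l : List (Option String)) :
    (c.zip oe).foldl pvMarkStep (h :: l)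
      = h :: (c.zip (oe.map (fun p => (p.1 - 1, p.2)))).foldl pvMarkStep l := by
  induction c generalizing oe l with
  | nil => simp
  | cons b c ih =>
    cases oe with
    | nil => simp
    | cons q oe =>
      have hq : (1 : Int) ≤ q.1 := hoe q (by simp)
      have hrest : ∀ p ∈ oe, (1 : Int) ≤ p.1 := fun p hp => hoe p (by simp [hp])
      simp only [List.map_cons, List.zip_cons_cons, List.foldl_cons]
      rw [show pvMarkStep (h :: l) (b, q)
            = h :: pvMarkStep l (b, q.1 - 1, q.2) from ?_, ih oe hrest]
      unfold pvMarkStep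
      cases b with
      | true => simp
      | false =>
        simp only [Bool.not_false, if_true]
        obtain ⟨m, hm⟩ : ∃ m : Nat, q.1 = ((m + 1 : Nat) : Int) :=
          ⟨(q.1 - 1).toNat, by omega⟩
        rw [hm, PySem.List.pySetD_natCast]
        have hsub : ((m + 1 : Nat) : Int) - 1 = ((m : Nat) : Int) := by push_cast; ring
        rw [hsub, PySem.List.pySetD_natCast]
        simp [List.set]

lemma filterMap_keep_some (t : String) (l : List (Option String)) :
    (some t :: l).filterMap pvKeep
      = if t ≠ "" then t :: l.filterMap pvKeep else l.filterMap pvKeep := by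
  by_cases h : t = "" <;> simp [pvKeep, h]

lemma altRec_cons (t : String) (ts : List String) (o : Bool) (os : List Bool) :
    pvAltRec (t :: ts) (o :: os)
      = if o then
          (if t ≠ "" then (pvAltRec ts os).map (t :: ·) else pvAltRec ts os) ++ pvAltRec ts os
        else
          (if t ≠ "" then (pvAltRec ts os).map (t :: ·) else pvAltRec ts os) := rfl

lemma key (tokens : List String) (optional_map : List Bool)
    (h : tokens.length = optional_map.length) :
    generate_token_signature_tuples tokens optional_map
      = pvAltRec tokens optional_map := by
  induction tokens generalizing optional_map with
  | nil =>
    cases optional_map with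
    | nil =>
      simp [A_unfold, pvOptElems, PySem.List.enumerate_nil, pvProductTF, pvAltRec]
    | cons o os => simp at h
  | cons t ts ih =>
    cases optional_map with
    | nil => simp at h
    | cons o os =>
      have hlen : ts.length = os.length := by simpa using h
      have hge : ∀ p ∈ pvOptElems (ts.zip os) 1, (1 : Int) ≤ p.1 := by
        have := optElems_indices_ge (ts.zip os) 1
        simpa using this
      have hshift : (pvOptElems (ts.zip os) 1).map (fun p => (p.1 - 1, p.2))
          = pvOptElems (ts.zip os) 0 := by
        simpa using optElems_shift (ts.zip os) 0
      have hlen01 : (pvOptElems (ts.zip os) 1).length = (pvOptElems (ts.zip os) 0).length := by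
        rw [← hshift, List.length_map]
      -- body of the inner map for the tail lists
      have hbody : ∀ c : List Bool,
          ((c.zip (pvOptElems (ts.zip os) 1)).foldl pvMarkStep
              (some t :: ts.map some)).filterMap pvKeep
            = (if t ≠ "" then (t :: ·) else id)
                (((c.zip (pvOptElems (ts.zip os) 0)).foldl pvMarkStep
                    (ts.map some)).filterMap pvKeep) := by
        intro c
        rw [foldl_markStep_cons c _ hge, hshift, filterMap_keep_some]
        by_cases ht : t = "" <;> simp [ht]
      cases o with
      | false =>
        rw [A_unfold]
        simp only [List.zip_cons_cons, optElems_cons, Bool.false_eq_true, if_false,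
          List.nil_append, zero_add]
        rw [hlen01]
        have h2 : (pvProductTF (pvOptElems (ts.zip os) 0).length).map (fun c =>
              ((c.zip (pvOptElems (ts.zip os) 1)).foldl pvMarkStep
                  ((t :: ts).map some)).filterMap pvKeep)
            = (generate_token_signature_tuples ts os).map
                (if t ≠ "" then (t :: ·) else id) := by
          rw [A_unfold, List.map_map]
          apply List.map_congr_left
          intro c _
          simpa using hbody c
        rw [h2, ih os hlen, altRec_cons]
        by_cases ht : t = "" <;> simp [ht]
      | true =>
        rw [A_unfold]
        simp only [List.zip_cons_cons, optElems_cons, reduceIte, List.singleton_append,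
          zero_add, List.length_cons, hlen01]
        rw [show pvProductTF ((pvOptElems (ts.zip os) 0).length + 1)
              = (pvProductTF (pvOptElems (ts.zip os) 0).length).map (true :: ·)
                ++ (pvProductTF (pvOptElems (ts.zip os) 0).length).map (false :: ·) from rfl,
            List.map_append]
        have h1 : ((pvProductTF (pvOptElems (ts.zip os) 0).length).map (true :: ·)).map
              (fun c => ((c.zip ((0, t) :: pvOptElems (ts.zip os) 1)).foldl pvMarkStep
                  ((t :: ts).map some)).filterMap pvKeep)
            = (generate_token_signature_tuples ts os).map
                (if t ≠ "" then (t :: ·) else id) := by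
          rw [List.map_map, A_unfold, List.map_map]
          apply List.map_congr_left
          intro c _
          simp only [Function.comp_apply, List.zip_cons_cons, List.foldl_cons]
          rw [show pvMarkStep ((t :: ts).map some) (true, 0, t) = some t :: ts.map some from by
                simp [pvMarkStep]]
          simpa using hbody c
        have h2 : ((pvProductTF (pvOptElems (ts.zip os) 0).length).map (false :: ·)).map
              (fun c => ((c.zip ((0, t) :: pvOptElems (ts.zip os) 1)).foldl pvMarkStep
                  ((t :: ts).map some)).filterMap pvKeep)
            = generate_token_signature_tuples ts os := by
          rw [List.map_map, A_unfold]
          apply List.map_congr_left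
          intro c _
          simp only [Function.comp_apply, List.zip_cons_cons, List.foldl_cons]
          rw [show pvMarkStep ((t :: ts).map some) (false, 0, t) = none :: ts.map some from by
                simp only [pvMarkStep, Bool.not_false, if_true, List.map_cons]
                rw [show (0 : Int) = ((0 : Nat) : Int) from rfl, PySem.List.pySetD_natCast]
                simp [List.set]]
          rw [foldl_markStep_cons c _ hge, hshift]
          simp [pvKeep]
        rw [h1, h2, ih os hlen, altRec_cons]
        by_cases ht : t = "" <;> simp [ht]

-- ===== VERDICT (by name: the statement is the Claim_ definition above) =====
theorem generate_token_signature_tuples_spec : Claim_equal_generate_token_signature_tuples := by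
  intro tokens om _ hpre
  exact key tokens om hpre
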